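-- pv_equiv track=rewrite | github.com/Goader/ukr-lm | benchmarks/ner/train.py | align_labels_with_tokens
-- ===== SOURCE A (Python) =====
-- def align_labels_with_tokens(labels, word_ids, task='ner'):
--     new_labels = []
--     current_word = None
--     for word_id in word_ids:
--         if word_id != current_word:
--             # Start of a new word!
--             current_word = word_id
--             label = -100 if word_id is None else labels[word_id]
--             new_labels.append(label)
--         elif word_id is None:
--             # Special token
--             new_labels.append(-100)
--         else:
--             if task == 'ner':
--                 # Same word as previous token
--                 label = labels[word_id]
--                 # If the label is B-XXX we change it to I-XXX
--                 if label % 2 == 1: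
--                     label += 1
--                 new_labels.append(label)
--             else:  # task == 'pos'
--                 new_labels.append(-100)
--
--     return new_labels
-- ===== SOURCE B (Python) =====
-- def align_labels_with_tokens(labels, word_ids, task='ner'):
--     # Two staged passes: run-length encode word_ids into maximal (word_id, count)
--     # groups, then expand each group independently and concatenate.
--     groups = []
--     for wid in word_ids:
--         if groups and groups[-1][0] == wid:
--             groups[-1] = (wid, groups[-1][1] + 1)
--         else:
--             groups.append((wid, 1))
--
--     out = []
--     for k, n in groups:
--         if k is None:
--             out += [-100] * n
--         else:
--             head = labels[k]
--             if task == 'ner':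
--                 lab = head + 1 if head % 2 == 1 else head
--             else:
--                 lab = -100
--             out += [head] + [lab] * (n - 1)
--     return out
-- ===== Notes on version B (the rewrite author's own statement) =====
-- stated objective: alternative
-- what changed: Replaces A's single stateful pass tracking current_word with two staged passes: run-length encode word_ids into maximal (word_id,count) groups, then expand each group independently (head label plus replicated continuation label) and concatenate.
import Mathlib
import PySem

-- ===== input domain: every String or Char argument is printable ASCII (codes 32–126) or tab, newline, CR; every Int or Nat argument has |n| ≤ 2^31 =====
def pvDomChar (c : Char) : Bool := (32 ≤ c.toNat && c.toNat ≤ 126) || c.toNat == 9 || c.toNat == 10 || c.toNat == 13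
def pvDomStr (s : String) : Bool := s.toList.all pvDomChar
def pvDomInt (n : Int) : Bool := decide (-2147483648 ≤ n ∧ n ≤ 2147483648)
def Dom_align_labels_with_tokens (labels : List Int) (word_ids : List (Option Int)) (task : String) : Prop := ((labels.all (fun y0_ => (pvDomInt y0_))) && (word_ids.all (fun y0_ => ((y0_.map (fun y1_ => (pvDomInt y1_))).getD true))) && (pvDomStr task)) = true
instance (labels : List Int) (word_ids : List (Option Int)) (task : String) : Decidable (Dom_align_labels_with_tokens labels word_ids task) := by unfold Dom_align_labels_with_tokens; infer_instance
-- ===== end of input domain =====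

-- B replaces A's single stateful current_word loop by two staged passes: run-length encode
-- word_ids into maximal (word_id, count) groups, then expand each group independently.

-- ===== PORT A =====
-- loop body of A's for-loop; state = (current_word, new_labels).
-- labels[word_id] is ported as pyGetD with default 0: in range under Pre_.
def alignStepA (labels : List Int) (task : String) (st : Option Int × List Int) (word_id : Option Int) : Option Int × List Int :=
  if word_id ≠ st.1 then
    -- Start of a new word!
    (word_id, st.2 ++ [match word_id with
      | none => (-100 : Int)
      | some k => PySem.List.pyGetD labels k 0])
  else
    match word_id with
    | none =>
      -- Special token
      (st.1, st.2 ++ [(-100 : Int)])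
    | some k =>
      if task = "ner" then
        -- Same word as previous token; B-XXX (odd) becomes I-XXX
        let label := PySem.List.pyGetD labels k 0
        let label := if PySem.Int.mod label 2 = 1 then label + 1 else label
        (st.1, st.2 ++ [label])
      else  -- task == 'pos'
        (st.1, st.2 ++ [(-100 : Int)])

def align_labels_with_tokens (labels : List Int) (word_ids : List (Option Int)) (task : String) : List Int :=
  (word_ids.foldl (alignStepA labels task) (none, [])).2

-- ===== PORT B =====
-- Source B's first loop: extend the most recent group (kept at the FRONT here, the list is built
-- reversed and reversed once at the end — Python appends at the back) or open a new one.
def rleStepB (gs : List (Option Int × Nat)) (wid : Option Int) : List (Option Int × Nat) :=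
  match gs with
  | (k, n) :: t => if k = wid then (wid, n + 1) :: t else (wid, 1) :: (k, n) :: t
  | [] => [(wid, 1)]

-- Source B's second loop body: the per-group expansion ([head] + [lab]*(n-1), or [-100]*n).
def emitGroupB (labels : List Int) (task : String) (g : Option Int × Nat) : List Int :=
  match g.1 with
  | none => List.replicate g.2 (-100)
  | some k =>
    let head := PySem.List.pyGetD labels k 0  -- in range under Pre_
    let lab := if task = "ner" then (if PySem.Int.mod head 2 = 1 then head + 1 else head) else -100
    head :: List.replicate (g.2 - 1) lab

-- the 'out += …' concatenation loop over groups is the flat map of emitGroupB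
def align_labels_with_tokens_alt (labels : List Int) (word_ids : List (Option Int)) (task : String) : List Int :=
  ((word_ids.foldl rleStepB []).reverse).flatMap (emitGroupB labels task)

-- ===== PRECONDITION & SPEC =====
-- Pre_ holds exactly when Python A returns (no IndexError): labels[k] is only evaluated for a
-- token whose word_id is some k and which either starts a word (differs from its predecessor)
-- or is a continuation with task == 'ner'.
def Pre_align_labels_with_tokens (labels : List Int) (word_ids : List (Option Int)) (task : String) : Prop :=
  ∀ pw ∈ (((none : Option Int) :: word_ids).zip word_ids), ∀ k : Int, pw.2 = some k →
    (pw.2 ≠ pw.1 ∨ task = "ner") → PySem.Raise.InRange labels.length k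
instance (labels : List Int) (word_ids : List (Option Int)) (task : String) : Decidable (Pre_align_labels_with_tokens labels word_ids task) := by unfold Pre_align_labels_with_tokens; infer_instance

def pvWitness_align_labels_with_tokens : List Int × List (Option Int) × String :=
  ([1, 2, 0], [none, some 0, some 0, some 1, some 2, none], "ner")

def Spec_align_labels_with_tokens (labels : List Int) (word_ids : List (Option Int)) (task : String) (out : List Int) : Prop := out = align_labels_with_tokens_alt labels word_ids task
instance (labels : List Int) (word_ids : List (Option Int)) (task : String) (out : List Int) : Decidable (Spec_align_labels_with_tokens labels word_ids task out) := by unfold Spec_align_labels_with_tokens; infer_instance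

-- ===== CLAIM (what is proved, stated in full; the proofs are below) =====
def Claim_equal_align_labels_with_tokens : Prop := ∀ (labels : List Int) (word_ids : List (Option Int)) (task : String), Dom_align_labels_with_tokens labels word_ids task → Pre_align_labels_with_tokens labels word_ids task → Spec_align_labels_with_tokens labels word_ids task (align_labels_with_tokens labels word_ids task)

-- ===== LEMMAS AND PROOFS =====

-- proof-side vocabulary: the start-of-word label and the continuation label of a word_id
def startL (labels : List Int) (w : Option Int) : Int :=
  match w with | none => -100 | some k => PySem.List.pyGetD labels k 0

def contL (labels : List Int) (task : String) (w : Option Int) : Int :=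
  match w with
  | none => -100
  | some k =>
    if task = "ner" then
      (let head := PySem.List.pyGetD labels k 0
       if PySem.Int.mod head 2 = 1 then head + 1 else head)
    else -100

-- the common recursive specification: each token's label from (previous word_id, word_id)
def fRec (labels : List Int) (task : String) : Option Int → List (Option Int) → List Int
  | _, [] => []
  | p, x :: xs => (if x = p then contL labels task x else startL labels x) :: fRec labels task x xs

lemma startL_none (labels : List Int) (task : String) :
    startL labels none = contL labels task none := rfl

-- A's step appends the token label and moves current_word to this word_id.
lemma alignStepA_eq (labels : List Int) (task : String) (p : Option Int) (acc : List Int) (w : Option Int) :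
    alignStepA labels task (p, acc) w
      = (w, acc ++ [if w = p then contL labels task w else startL labels w]) := by
  unfold alignStepA contL startL
  by_cases hw : w = p
  · subst hw
    cases w with
    | none => simp
    | some k => by_cases ht : task = "ner" <;> simp [ht]
  · cases w with
    | none => simp [hw]
    | some k => simp [hw]

-- A's loop, from any state, appends fRec of the remaining tokens
lemma foldA_eq (labels : List Int) (task : String) :
    ∀ (l : List (Option Int)) (p : Option Int) (acc : List Int),
      (l.foldl (alignStepA labels task) (p, acc)).2 = acc ++ fRec labels task p l := by
  intro l
  induction l with
  | nil => intro p acc; simp [fRec]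
  | cons w rest ih =>
    intro p acc
    simp only [List.foldl_cons, alignStepA_eq, ih, fRec]
    simp

lemma emitGroupB_one (labels : List Int) (task : String) (w : Option Int) :
    emitGroupB labels task (w, 1) = [startL labels w] := by
  cases w <;> simp [emitGroupB, startL]

lemma emitGroupB_succ (labels : List Int) (task : String) (w : Option Int) (n : Nat) (hn : 1 ≤ n) :
    emitGroupB labels task (w, n + 1) = emitGroupB labels task (w, n) ++ [contL labels task w] := by
  cases w with
  | none =>
    simp [emitGroupB, contL, List.replicate_succ']
  | some k =>
    simp only [emitGroupB, contL]
    have h1 : n + 1 - 1 = (n - 1) + 1 := by omega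
    rw [h1, List.replicate_succ']
    simp

-- B's first loop, from any non-empty group state, appends fRec against the current run key
lemma foldB_inv (labels : List Int) (task : String) :
    ∀ (l : List (Option Int)) (k : Option Int) (n : Nat) (t : List (Option Int × Nat)), 1 ≤ n →
      ((l.foldl rleStepB ((k, n) :: t)).reverse).flatMap (emitGroupB labels task)
        = (((k, n) :: t).reverse).flatMap (emitGroupB labels task) ++ fRec labels task k l := by
  intro l
  induction l with
  | nil => intro k n t hn; simp [fRec]
  | cons x rest ih =>
    intro k n t hn
    by_cases hx : k = x
    · subst hx
      simp only [List.foldl_cons, rleStepB, if_true]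
      rw [ih k (n + 1) t (by omega)]
      simp only [fRec, if_true]
      simp [emitGroupB_succ labels task k n hn]
    · simp only [List.foldl_cons, rleStepB, if_neg hx]
      
      rw [ih x 1 ((k, n) :: t) (le_refl 1)]
      have hxk : x ≠ k := fun h => hx h.symm
      simp only [fRec, if_neg hxk]
      simp [emitGroupB_one]

lemma altB_eq (labels : List Int) (task : String) (word_ids : List (Option Int)) :
    align_labels_with_tokens_alt labels word_ids task = fRec labels task none word_ids := by
  unfold align_labels_with_tokens_alt
  cases word_ids with
  | nil => simp [fRec]
  | cons x rest =>
    simp only [List.foldl_cons, rleStepB]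
    rw [foldB_inv labels task rest x 1 [] (le_refl 1)]
    cases x with
    | none => simp [emitGroupB_one, fRec, startL_none labels task]
    | some k => simp [emitGroupB_one, fRec]

-- ===== VERDICT (by name: the statement is the Claim_ definition above) =====
theorem align_labels_with_tokens_spec : Claim_equal_align_labels_with_tokens := by
  intro labels word_ids task _ _
  unfold Spec_align_labels_with_tokens align_labels_with_tokens
  rw [altB_eq, foldA_eq]
  simp
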